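-- pv_equiv track=rewrite | github.com/joshr17/markov-aggregation | elimination_experiments.py | get_permutation_and_order_from_partition
-- ===== SOURCE A (Python) =====
-- def get_permutation_and_order_from_partition(partition):
--     """ Returns the permutation required to eliminate in the order specified by
--     partition, which is the output of the community.best_partition function.
--     """
--     number_of_communities = len(set(partition.values()))
--
--     permutation = []
--     order = []
--     for i in range(number_of_communities):
--         ith_community_nodes = [node for node in partition if partition[node] == i]
--         permutation = permutation + ith_community_nodes
--         order.append(len(ith_community_nodes))
--
--     return(permutation, order)
-- ===== SOURCE B (Python) =====
-- def get_permutation_and_order_from_partition(partition):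
--     buckets = {}
--     for node, c in partition.items():
--         buckets.setdefault(c, []).append(node)
--     groups = [buckets.get(i, []) for i in range(len(buckets))]
--     return ([n for g in groups for n in g], [len(g) for g in groups])
-- ===== Notes on version B (the rewrite author's own statement) =====
-- stated objective: faster
-- what changed: Replaced the per-community rescan of the whole dict (one filter pass per community id) with a single bucketing pass over the items, then the result is assembled by flattening the list of buckets 0..C-1 and mapping lengths instead of folding an accumulator per community.
import Mathlib
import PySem

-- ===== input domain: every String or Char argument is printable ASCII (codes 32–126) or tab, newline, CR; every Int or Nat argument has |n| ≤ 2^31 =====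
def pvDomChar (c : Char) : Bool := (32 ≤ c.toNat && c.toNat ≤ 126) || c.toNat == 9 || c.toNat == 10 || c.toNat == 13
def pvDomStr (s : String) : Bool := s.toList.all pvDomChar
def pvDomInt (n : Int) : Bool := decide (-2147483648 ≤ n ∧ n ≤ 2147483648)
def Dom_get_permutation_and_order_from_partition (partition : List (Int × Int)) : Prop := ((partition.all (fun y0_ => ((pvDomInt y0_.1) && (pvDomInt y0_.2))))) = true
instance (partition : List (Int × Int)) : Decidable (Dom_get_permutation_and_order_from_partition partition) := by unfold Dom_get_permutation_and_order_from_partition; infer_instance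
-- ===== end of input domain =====

-- B replaces A's per-community rescan of the dict with one bucketing pass, and assembles the
-- result by flattening the bucket list instead of folding an accumulator (faster: O(N + C) vs O(C*N)).

-- ===== PORT A =====
def get_permutation_and_order_from_partition (partition : List (Int × Int)) : List Int × List Int :=
  let d : PySem.Dict Int Int := PySem.Dict.ofList partition
  let number_of_communities : Nat := (PySem.Set.ofList d.values).length
  (PySem.List.pyRange 0 (number_of_communities : Int) 1).foldl
    (fun (acc : List Int × List Int) i =>
      let ith_community_nodes := d.keys.filter (fun node => d.getD node 0 == i)
      (acc.1 ++ ith_community_nodes, acc.2 ++ [(ith_community_nodes.length : Int)]))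
    ([], [])

-- ===== PORT B =====
def get_permutation_and_order_from_partition_alt (partition : List (Int × Int)) : List Int × List Int :=
  let d : PySem.Dict Int Int := PySem.Dict.ofList partition
  let buckets : PySem.Dict Int (List Int) :=
    d.items.foldl (fun b p => b.modify p.2 [] (· ++ [p.1])) PySem.Dict.empty
  let groups : List (List Int) :=
    (PySem.List.pyRange 0 (buckets.size : Int) 1).map (fun i => buckets.getD i [])
  (groups.flatten, groups.map (fun g => (g.length : Int)))

-- ===== PRECONDITION & SPEC =====
def Spec_get_permutation_and_order_from_partition (partition : List (Int × Int)) (out : List Int × List Int) : Prop := out = get_permutation_and_order_from_partition_alt partition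
instance (partition : List (Int × Int)) (out : List Int × List Int) : Decidable (Spec_get_permutation_and_order_from_partition partition out) := by unfold Spec_get_permutation_and_order_from_partition; infer_instance

-- ===== CLAIM (what is proved, stated in full; the proofs are below) =====
def Claim_equal_get_permutation_and_order_from_partition : Prop := ∀ (partition : List (Int × Int)), Dom_get_permutation_and_order_from_partition partition → Spec_get_permutation_and_order_from_partition partition (get_permutation_and_order_from_partition partition)

-- ===== LEMMAS AND PROOFS =====

-- A's pair-accumulator fold is a flatten-of-map plus a map (the shape B computes directly).
theorem foldl_pair_flatten (l : List Int) (f : Int → List Int) (a b : List Int) :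
    l.foldl (fun (acc : List Int × List Int) i => (acc.1 ++ f i, acc.2 ++ [((f i).length : Int)])) (a, b)
      = (a ++ (l.map f).flatten, b ++ l.map (fun i => ((f i).length : Int))) := by
  induction l generalizing a b with
  | nil => simp
  | cons x xs ih => simp [List.foldl_cons, ih]

-- The bucket for community i is exactly the nodes of the dict whose value is i.
theorem buckets_getD (d : PySem.Dict Int Int) (i : Int) :
    (d.items.foldl (fun (b : PySem.Dict Int (List Int)) p => b.modify p.2 [] (· ++ [p.1]))
        PySem.Dict.empty).getD i []
      = (d.items.filter (fun p => p.2 == i)).map (·.1) := by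
  have h : d.items.foldl (fun (b : PySem.Dict Int (List Int)) p => b.modify p.2 [] (· ++ [p.1]))
        PySem.Dict.empty
      = (d.items.map (fun p => (p.2, p.1))).foldl
          (fun (b : PySem.Dict Int (List Int)) p => b.modify p.1 [] (· ++ [p.2])) PySem.Dict.empty := by
    rw [List.foldl_map]
  rw [h, PySem.Dict.getD_foldl_modify_append, PySem.Dict.getD_empty, List.filter_map,
    List.map_map]
  simp [Function.comp_def]

-- A's per-community filter over the keys computes the same node list.
theorem filter_keys_eq (d : PySem.Dict Int Int) (hnd : d.keys.Nodup) (i : Int) :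
    d.keys.filter (fun node => d.getD node 0 == i)
      = (d.items.filter (fun p => p.2 == i)).map (·.1) := by
  rw [PySem.Dict.items_eq_map_keys d hnd 0, List.filter_map, List.map_map]
  simp [Function.comp_def]

-- The number of buckets is the number of distinct community values.
theorem buckets_size (d : PySem.Dict Int Int) :
    (d.items.foldl (fun (b : PySem.Dict Int (List Int)) p => b.modify p.2 [] (· ++ [p.1]))
        PySem.Dict.empty).size
      = (PySem.Set.ofList d.values).length := by
  have hk := PySem.Dict.keys_foldl_modify_key d.items (fun p => p.2) ([] : List Int)
      (fun _ p => (· ++ [p.1])) (PySem.Dict.empty : PySem.Dict Int (List Int))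
  have hs : ∀ (b : PySem.Dict Int (List Int)), b.size = b.keys.length := fun b => by
    simp [PySem.Dict.size, PySem.Dict.keys]
  rw [hs, hk]
  simp [PySem.Set.update, PySem.Set.ofList, PySem.Dict.keys_empty, PySem.Dict.values]

-- ===== VERDICT (by name: the statement is the Claim_ definition above) =====
theorem get_permutation_and_order_from_partition_spec : Claim_equal_get_permutation_and_order_from_partition := by
  intro partition _
  unfold Spec_get_permutation_and_order_from_partition
  unfold get_permutation_and_order_from_partition get_permutation_and_order_from_partition_alt
  dsimp only
  rw [buckets_size, foldl_pair_flatten]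
  have hfun : ∀ i, (PySem.Dict.ofList partition).keys.filter
        (fun node => (PySem.Dict.ofList partition).getD node 0 == i)
      = ((PySem.Dict.ofList partition).items.foldl
          (fun (b : PySem.Dict Int (List Int)) p => b.modify p.2 [] (· ++ [p.1]))
          PySem.Dict.empty).getD i [] := fun i => by
    rw [buckets_getD, filter_keys_eq _ (PySem.Dict.nodup_keys_ofList partition)]
  simp only [List.nil_append, List.map_map, Function.comp_def]
  refine congrArg₂ Prod.mk ?_ ?_
  · exact congrArg List.flatten (List.map_congr_left fun i _ => hfun i)
  · exact List.map_congr_left fun i _ => by rw [hfun i]
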